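-- pv_equiv track=rewrite | github.com/FLCarpenter/PhyloCode | RY_Recoder_Binary.py | RY_Recoding_Codon_NT3R
-- ===== SOURCE A (Python) =====
-- def RY_Recoding_Codon_NT3R(Sequence, Position):
--     Pos = int(Position)
--     Index = 1 + (2 - Pos)
--     recoded_seq = ''
--     for base in Sequence:
--         if (Index + 2) % 2 == 0:
--             if base in 'AGagRr':
--                 recoded_seq += 'R'
--             elif base in 'TCtcYy':
--                 recoded_seq += 'Y'
--             else:
--                 recoded_seq += '-'
--         else:
--             recoded_seq += base
--         Index += 1
--     return recoded_seq
-- ===== SOURCE B (Python) =====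
-- def _merge(xs, ys):
--     # interleave: xs holds the even output positions, ys the odd ones; len(xs)-len(ys) in {0,1}
--     out = []
--     for x, y in zip(xs, ys):
--         out.append(x)
--         out.append(y)
--     out.extend(xs[len(ys):])
--     return out
--
--
-- def RY_Recoding_Codon_NT3R(Sequence, Position):
--     start = (3 - int(Position)) % 2
--     table = {c: 'R' for c in 'AGagRr'}
--     table.update({c: 'Y' for c in 'TCtcYy'})
--     chars = list(Sequence)
--     if start == 0:
--         recoded = [table.get(c, '-') for c in chars[0::2]]
--         merged = _merge(recoded, chars[1::2])
--     else:
--         recoded = [table.get(c, '-') for c in chars[1::2]]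
--         merged = _merge(chars[0::2], recoded)
--     return ''.join(merged)
-- ===== Notes on version B (the rewrite author's own statement) =====
-- stated objective: alternative
-- what changed: Replaces A's single positional-parity scan with a per-character index counter and string += by a stride decomposition: split the sequence into its two parity classes by slicing, recode one class through a lookup dict with default, and interleave the two classes back.
import Mathlib
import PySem

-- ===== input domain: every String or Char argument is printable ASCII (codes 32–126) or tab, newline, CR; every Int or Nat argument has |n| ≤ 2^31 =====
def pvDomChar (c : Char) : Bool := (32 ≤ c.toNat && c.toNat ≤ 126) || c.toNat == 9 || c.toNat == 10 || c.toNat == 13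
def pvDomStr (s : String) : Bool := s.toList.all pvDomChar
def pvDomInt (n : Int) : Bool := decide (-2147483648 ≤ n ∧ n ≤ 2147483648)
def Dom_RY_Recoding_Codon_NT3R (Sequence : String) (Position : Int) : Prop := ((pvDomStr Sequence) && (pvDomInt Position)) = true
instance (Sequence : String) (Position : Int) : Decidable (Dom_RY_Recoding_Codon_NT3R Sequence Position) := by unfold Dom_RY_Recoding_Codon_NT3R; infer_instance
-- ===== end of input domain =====

-- B recodes by stride: it partitions the sequence into the two parity classes of positions,
-- dict-recodes one class, and interleaves the classes back (objective: alternative decomposition).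

-- ===== PORT A =====
-- the growing Python str is carried as a List Char and packed by String.mk at the end (exact);
-- `base in 'AGagRr'` with `base` a single char from the iteration is membership in its chars (exact)
def RY_Recoding_Codon_NT3R (Sequence : String) (Position : Int) : String :=
  let Pos : Int := Position              -- int(Position) on an int is the identity
  let Index : Int := 1 + (2 - Pos)
  let st := Sequence.toList.foldl (fun (st : List Char × Int) base =>
      if PySem.Int.mod (st.2 + 2) 2 == 0 then
        if ['A','G','a','g','R','r'].contains base then (st.1 ++ ['R'], st.2 + 1)
        else if ['T','C','t','c','Y','y'].contains base then (st.1 ++ ['Y'], st.2 + 1)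
        else (st.1 ++ ['-'], st.2 + 1)
      else (st.1 ++ [base], st.2 + 1)) ([], Index)
  String.mk st.1

-- ===== PORT B =====
-- Source B's _merge: interleave two lists, xs holding the even output positions
def pvMerge (xs ys : List Char) : List Char :=
  ((xs.zip ys).foldl (fun acc p => (acc ++ [p.1]) ++ [p.2]) []) ++ xs.drop ys.length

-- Source B's table: {c: 'R' for c in 'AGagRr'} then .update({c: 'Y' for c in 'TCtcYy'})
def pvTable : PySem.Dict Char Char :=
  ['T','C','t','c','Y','y'].foldl (fun d c => d.insert c 'Y')
    (['A','G','a','g','R','r'].foldl (fun d c => d.insert c 'R') PySem.Dict.empty)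

-- hand-ported stride slice (exact): chars[s::2] for s in {0,1} = every second element of (drop s)
def pvEvery2 : List Char → List Char
  | [] => []
  | [a] => [a]
  | a :: _ :: t => a :: pvEvery2 t

def RY_Recoding_Codon_NT3R_alt (Sequence : String) (Position : Int) : String :=
  let start := PySem.Int.mod (3 - Position) 2
  let chars := Sequence.toList
  if start == 0 then
    String.mk (pvMerge ((pvEvery2 chars).map (fun c => pvTable.getD c '-'))
                       (pvEvery2 (chars.drop 1)))
  else
    String.mk (pvMerge (pvEvery2 chars)
                       ((pvEvery2 (chars.drop 1)).map (fun c => pvTable.getD c '-')))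

-- ===== PRECONDITION & SPEC =====
def Spec_RY_Recoding_Codon_NT3R (Sequence : String) (Position : Int) (out : String) : Prop := out = RY_Recoding_Codon_NT3R_alt Sequence Position
instance (Sequence : String) (Position : Int) (out : String) : Decidable (Spec_RY_Recoding_Codon_NT3R Sequence Position out) := by unfold Spec_RY_Recoding_Codon_NT3R; infer_instance

-- ===== CLAIM (what is proved, stated in full; the proofs are below) =====
def Claim_equal_RY_Recoding_Codon_NT3R : Prop := ∀ (Sequence : String) (Position : Int), Dom_RY_Recoding_Codon_NT3R Sequence Position → Spec_RY_Recoding_Codon_NT3R Sequence Position (RY_Recoding_Codon_NT3R Sequence Position)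

-- ===== LEMMAS AND PROOFS =====

-- A's per-char recode, and the unrolled per-position character stream of A's loop
def pvRecA (c : Char) : Char :=
  if ['A','G','a','g','R','r'].contains c then 'R'
  else if ['T','C','t','c','Y','y'].contains c then 'Y' else '-'

def pvSpine : List Char → Int → List Char
  | [], _ => []
  | b :: t, n => (if PySem.Int.mod (n + 2) 2 == 0 then pvRecA b else b) :: pvSpine t (n + 1)

theorem pv_mod_eq (m : Int) : PySem.Int.mod m 2 = m % 2 :=
  PySem.Int.mod_eq_emod_of_pos (by norm_num)

theorem pv_cond_true (n : Int) (h : n % 2 = 0) :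
    (PySem.Int.mod (n + 2) 2 == 0) = true := by
  rw [pv_mod_eq]; simp; omega

theorem pv_cond_false (n : Int) (h : n % 2 = 1) :
    (PySem.Int.mod (n + 2) 2 == 0) = false := by
  rw [pv_mod_eq]; simp; omega

theorem pv_foldA (l : List Char) (acc : List Char) (n : Int) :
    (l.foldl (fun (st : List Char × Int) base =>
      if PySem.Int.mod (st.2 + 2) 2 == 0 then
        if ['A','G','a','g','R','r'].contains base then (st.1 ++ ['R'], st.2 + 1)
        else if ['T','C','t','c','Y','y'].contains base then (st.1 ++ ['Y'], st.2 + 1)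
        else (st.1 ++ ['-'], st.2 + 1)
      else (st.1 ++ [base], st.2 + 1)) (acc, n)).1
    = acc ++ pvSpine l n := by
  induction l generalizing acc n with
  | nil => simp [pvSpine]
  | cons b t ih =>
    by_cases hd : PySem.Int.mod (n + 2) 2 = 0
    · have h : (PySem.Int.mod (n + 2) 2 == 0) = true := by
        rw [pv_mod_eq] at hd ⊢; simp; omega
      simp only [List.foldl_cons, pvSpine, pvRecA, h, if_true]
      by_cases h1 : (['A','G','a','g','R','r'].contains b) = true
      · simp only [h1, if_true]; rw [ih]; simp
      · rw [Bool.not_eq_true] at h1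
        by_cases h2 : (['T','C','t','c','Y','y'].contains b) = true
        · simp only [h1, h2, Bool.false_eq_true, if_false, if_true]; rw [ih]; simp
        · rw [Bool.not_eq_true] at h2
          simp only [h1, h2, Bool.false_eq_true, if_false]; rw [ih]; simp
    · have h : (PySem.Int.mod (n + 2) 2 == 0) = false := by
        rw [pv_mod_eq] at hd ⊢; simp; omega
      simp only [List.foldl_cons, pvSpine, h, Bool.false_eq_true, if_false]
      rw [ih]; simp

theorem pv_foldMerge (ps : List (Char × Char)) (acc : List Char) :
    ps.foldl (fun acc p => (acc ++ [p.1]) ++ [p.2]) acc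
      = acc ++ (ps.map (fun p => [p.1, p.2])).flatten := by
  induction ps generalizing acc with
  | nil => simp
  | cons p t ih => simp [ih]

theorem pvMerge_eq (xs ys : List Char) :
    pvMerge xs ys = ((xs.zip ys).map (fun p => [p.1, p.2])).flatten ++ xs.drop ys.length := by
  simp [pvMerge, pv_foldMerge]

theorem pvMerge_nil (xs : List Char) : pvMerge xs [] = xs := by simp [pvMerge_eq]

theorem pvMerge_cons_cons (x y : Char) (xs ys : List Char) :
    pvMerge (x :: xs) (y :: ys) = x :: y :: pvMerge xs ys := by
  simp [pvMerge_eq]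

theorem pvEvery2_cons (a : Char) (t : List Char) :
    pvEvery2 (a :: t) = a :: pvEvery2 (t.drop 1) := by
  cases t <;> simp [pvEvery2]

theorem pv_spine_merge (l : List Char) : ∀ n : Int,
    (n % 2 = 0 →
      pvSpine l n = pvMerge ((pvEvery2 l).map pvRecA) (pvEvery2 (l.drop 1))) ∧
    (n % 2 = 1 →
      pvSpine l n = pvMerge (pvEvery2 l) ((pvEvery2 (l.drop 1)).map pvRecA)) := by
  induction l using pvEvery2.induct with
  | case1 =>
    intro n; constructor <;> intro _ <;> simp [pvSpine, pvEvery2, pvMerge_eq]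
  | case2 a =>
    intro n
    constructor <;> intro h
    · simp only [pvSpine, pv_cond_true n h, if_true]
      simp [pvEvery2, pvMerge_nil]
    · simp only [pvSpine, pv_cond_false n h, if_false]
      simp [pvEvery2, pvMerge_nil]
  | case3 a b t ih =>
    intro n
    have ht := ih (n + 1 + 1)
    constructor <;> intro h
    · have ht1 := ht.1 (by omega)
      simp only [pvSpine, pv_cond_true n h, pv_cond_false (n + 1) (by omega),
        if_true, if_false, List.drop_succ_cons, List.drop_zero, pvEvery2,
        List.map_cons, pvEvery2_cons b t]
      rw [pvMerge_cons_cons, ht1]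
      simp
    · have ht2 := ht.2 (by omega)
      simp only [pvSpine, pv_cond_false n h, pv_cond_true (n + 1) (by omega),
        if_true, if_false, List.drop_succ_cons, List.drop_zero, pvEvery2,
        List.map_cons, pvEvery2_cons b t]
      rw [pvMerge_cons_cons, ht2]
      simp

theorem pv_recode_eq (c : Char) : pvTable.getD c '-' = pvRecA c := by
  have htab : pvTable = ((((((((((((PySem.Dict.empty.insert 'A' 'R').insert 'G' 'R').insert 'a' 'R').insert 'g' 'R').insert 'R' 'R').insert 'r' 'R').insert 'T' 'Y').insert 'C' 'Y').insert 't' 'Y').insert 'c' 'Y').insert 'Y' 'Y').insert 'y' 'Y') := by simp [pvTable]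
  by_cases h1 : c = 'A'
  · subst h1; rw [htab, PySem.Dict.getD_insert_of_ne _ _ _ (by decide), PySem.Dict.getD_insert_of_ne _ _ _ (by decide), PySem.Dict.getD_insert_of_ne _ _ _ (by decide), PySem.Dict.getD_insert_of_ne _ _ _ (by decide), PySem.Dict.getD_insert_of_ne _ _ _ (by decide), PySem.Dict.getD_insert_of_ne _ _ _ (by decide), PySem.Dict.getD_insert_of_ne _ _ _ (by decide), PySem.Dict.getD_insert_of_ne _ _ _ (by decide), PySem.Dict.getD_insert_of_ne _ _ _ (by decide), PySem.Dict.getD_insert_of_ne _ _ _ (by decide), PySem.Dict.getD_insert_of_ne _ _ _ (by decide), PySem.Dict.getD_insert_self]; simp [pvRecA]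
  by_cases h2 : c = 'G'
  · subst h2; rw [htab, PySem.Dict.getD_insert_of_ne _ _ _ (by decide), PySem.Dict.getD_insert_of_ne _ _ _ (by decide), PySem.Dict.getD_insert_of_ne _ _ _ (by decide), PySem.Dict.getD_insert_of_ne _ _ _ (by decide), PySem.Dict.getD_insert_of_ne _ _ _ (by decide), PySem.Dict.getD_insert_of_ne _ _ _ (by decide), PySem.Dict.getD_insert_of_ne _ _ _ (by decide), PySem.Dict.getD_insert_of_ne _ _ _ (by decide), PySem.Dict.getD_insert_of_ne _ _ _ (by decide), PySem.Dict.getD_insert_of_ne _ _ _ (by decide), PySem.Dict.getD_insert_self]; simp [pvRecA]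
  by_cases h3 : c = 'a'
  · subst h3; rw [htab, PySem.Dict.getD_insert_of_ne _ _ _ (by decide), PySem.Dict.getD_insert_of_ne _ _ _ (by decide), PySem.Dict.getD_insert_of_ne _ _ _ (by decide), PySem.Dict.getD_insert_of_ne _ _ _ (by decide), PySem.Dict.getD_insert_of_ne _ _ _ (by decide), PySem.Dict.getD_insert_of_ne _ _ _ (by decide), PySem.Dict.getD_insert_of_ne _ _ _ (by decide), PySem.Dict.getD_insert_of_ne _ _ _ (by decide), PySem.Dict.getD_insert_of_ne _ _ _ (by decide), PySem.Dict.getD_insert_self]; simp [pvRecA]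
  by_cases h4 : c = 'g'
  · subst h4; rw [htab, PySem.Dict.getD_insert_of_ne _ _ _ (by decide), PySem.Dict.getD_insert_of_ne _ _ _ (by decide), PySem.Dict.getD_insert_of_ne _ _ _ (by decide), PySem.Dict.getD_insert_of_ne _ _ _ (by decide), PySem.Dict.getD_insert_of_ne _ _ _ (by decide), PySem.Dict.getD_insert_of_ne _ _ _ (by decide), PySem.Dict.getD_insert_of_ne _ _ _ (by decide), PySem.Dict.getD_insert_of_ne _ _ _ (by decide), PySem.Dict.getD_insert_self]; simp [pvRecA]
  by_cases h5 : c = 'R'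
  · subst h5; rw [htab, PySem.Dict.getD_insert_of_ne _ _ _ (by decide), PySem.Dict.getD_insert_of_ne _ _ _ (by decide), PySem.Dict.getD_insert_of_ne _ _ _ (by decide), PySem.Dict.getD_insert_of_ne _ _ _ (by decide), PySem.Dict.getD_insert_of_ne _ _ _ (by decide), PySem.Dict.getD_insert_of_ne _ _ _ (by decide), PySem.Dict.getD_insert_of_ne _ _ _ (by decide), PySem.Dict.getD_insert_self]; simp [pvRecA]
  by_cases h6 : c = 'r'
  · subst h6; rw [htab, PySem.Dict.getD_insert_of_ne _ _ _ (by decide), PySem.Dict.getD_insert_of_ne _ _ _ (by decide), PySem.Dict.getD_insert_of_ne _ _ _ (by decide), PySem.Dict.getD_insert_of_ne _ _ _ (by decide), PySem.Dict.getD_insert_of_ne _ _ _ (by decide), PySem.Dict.getD_insert_of_ne _ _ _ (by decide), PySem.Dict.getD_insert_self]; simp [pvRecA]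
  by_cases h7 : c = 'T'
  · subst h7; rw [htab, PySem.Dict.getD_insert_of_ne _ _ _ (by decide), PySem.Dict.getD_insert_of_ne _ _ _ (by decide), PySem.Dict.getD_insert_of_ne _ _ _ (by decide), PySem.Dict.getD_insert_of_ne _ _ _ (by decide), PySem.Dict.getD_insert_of_ne _ _ _ (by decide), PySem.Dict.getD_insert_self]; simp [pvRecA]
  by_cases h8 : c = 'C'
  · subst h8; rw [htab, PySem.Dict.getD_insert_of_ne _ _ _ (by decide), PySem.Dict.getD_insert_of_ne _ _ _ (by decide), PySem.Dict.getD_insert_of_ne _ _ _ (by decide), PySem.Dict.getD_insert_of_ne _ _ _ (by decide), PySem.Dict.getD_insert_self]; simp [pvRecA]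
  by_cases h9 : c = 't'
  · subst h9; rw [htab, PySem.Dict.getD_insert_of_ne _ _ _ (by decide), PySem.Dict.getD_insert_of_ne _ _ _ (by decide), PySem.Dict.getD_insert_of_ne _ _ _ (by decide), PySem.Dict.getD_insert_self]; simp [pvRecA]
  by_cases h10 : c = 'c'
  · subst h10; rw [htab, PySem.Dict.getD_insert_of_ne _ _ _ (by decide), PySem.Dict.getD_insert_of_ne _ _ _ (by decide), PySem.Dict.getD_insert_self]; simp [pvRecA]
  by_cases h11 : c = 'Y'
  · subst h11; rw [htab, PySem.Dict.getD_insert_of_ne _ _ _ (by decide), PySem.Dict.getD_insert_self]; simp [pvRecA]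
  by_cases h12 : c = 'y'
  · subst h12; rw [htab, PySem.Dict.getD_insert_self]; simp [pvRecA]
  rw [htab, PySem.Dict.getD_insert_of_ne _ _ _ h12, PySem.Dict.getD_insert_of_ne _ _ _ h11, PySem.Dict.getD_insert_of_ne _ _ _ h10, PySem.Dict.getD_insert_of_ne _ _ _ h9, PySem.Dict.getD_insert_of_ne _ _ _ h8, PySem.Dict.getD_insert_of_ne _ _ _ h7, PySem.Dict.getD_insert_of_ne _ _ _ h6, PySem.Dict.getD_insert_of_ne _ _ _ h5, PySem.Dict.getD_insert_of_ne _ _ _ h4, PySem.Dict.getD_insert_of_ne _ _ _ h3, PySem.Dict.getD_insert_of_ne _ _ _ h2, PySem.Dict.getD_insert_of_ne _ _ _ h1, PySem.Dict.getD_empty]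
  simp [pvRecA, h1, h2, h3, h4, h5, h6, h7, h8, h9, h10, h11, h12]

-- ===== VERDICT (by name: the statement is the Claim_ definition above) =====
theorem RY_Recoding_Codon_NT3R_spec : Claim_equal_RY_Recoding_Codon_NT3R := by
  intro Sequence Position _
  unfold Spec_RY_Recoding_Codon_NT3R RY_Recoding_Codon_NT3R RY_Recoding_Codon_NT3R_alt
  simp only []
  rw [pv_foldA]
  have hst : (1 : Int) + (2 - Position) = 3 - Position := by ring
  have hfun : (fun c => pvTable.getD c '-') = pvRecA := funext pv_recode_eq
  rw [hst, hfun]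
  rcases Int.emod_two_eq_zero_or_one (3 - Position) with h | h
  · have hb : (PySem.Int.mod (3 - Position) 2 == 0) = true := by
      rw [pv_mod_eq]; simp [h]
    simp only [hb, if_true, List.nil_append]
    exact congrArg String.mk ((pv_spine_merge Sequence.toList (3 - Position)).1 h)
  · have hb : (PySem.Int.mod (3 - Position) 2 == 0) = false := by
      rw [pv_mod_eq]; simp [h]
    simp only [hb, if_false, List.nil_append]
    exact congrArg String.mk ((pv_spine_merge Sequence.toList (3 - Position)).2 h)
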